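-- pv_equiv track=rewrite | github.com/anuragdogra2192/Data_structures_with_python3 | stacks/Sunset_view.py | examine_buildings_with_subset
-- ===== SOURCE A (Python) =====
-- from typing import Iterator, List
--
-- def examine_buildings_with_subset(sequence: Iterator[int])->List[int]:
--
--     SunSet_buildings=[]
--     h_idx = -1 #height index
--     i=0
--     while i<len(sequence) and h_idx<len(sequence):
--         while SunSet_buildings and SunSet_buildings[-1] <= sequence[i] and h_idx>=0:
--             SunSet_buildings.pop()
--             h_idx-=1
--
--         SunSet_buildings.append(sequence[i])
--         h_idx+=1
--         i+=1
--
--     #Return Height SunSet_buildings from East to West and len() returns the number of buildings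
--     return SunSet_buildings
-- ===== SOURCE B (Python) =====
-- from typing import Iterator, List
--
-- def examine_buildings_with_subset(sequence: Iterator[int]) -> List[int]:
--     # A building sees the sunset iff it is strictly taller than every building
--     # to its east: collect the strict suffix maxima by one right-to-left pass.
--     result = []
--     best = None
--     for i in range(len(sequence) - 1, -1, -1):
--         if best is None or sequence[i] > best:
--             result.append(sequence[i])
--             best = sequence[i]
--     result.reverse()
--     return result
-- ===== Notes on version B (the rewrite author's own statement) =====
-- stated objective: simpler
-- what changed: Replaces the monotonic stack with its inner pop-while loop by a single right-to-left pass keeping a running maximum (strict suffix maxima), reversed at the end.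
import Mathlib
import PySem

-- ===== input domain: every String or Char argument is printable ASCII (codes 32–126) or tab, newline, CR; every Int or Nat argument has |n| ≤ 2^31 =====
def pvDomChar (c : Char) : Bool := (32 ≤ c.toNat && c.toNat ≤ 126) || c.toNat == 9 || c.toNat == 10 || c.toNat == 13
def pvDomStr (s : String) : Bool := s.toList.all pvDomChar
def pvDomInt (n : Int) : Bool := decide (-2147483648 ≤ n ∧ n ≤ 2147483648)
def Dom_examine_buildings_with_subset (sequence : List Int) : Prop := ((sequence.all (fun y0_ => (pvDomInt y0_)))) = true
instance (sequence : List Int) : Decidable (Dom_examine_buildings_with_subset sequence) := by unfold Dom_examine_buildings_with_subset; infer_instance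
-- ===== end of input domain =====

-- B replaces A's monotonic stack (pop while top ≤ current) by a single right-to-left
-- pass keeping a running maximum, reversed at the end; objective: simpler.

-- ===== PORT A =====
-- inner `while SunSet_buildings and SunSet_buildings[-1] <= sequence[i] and h_idx>=0: pop; h_idx-=1`
def pvInnerA (stack : List Int) (h_idx x : Int) : List Int × Int :=
  if stack ≠ [] ∧ stack.getLast! ≤ x ∧ 0 ≤ h_idx then
    pvInnerA stack.dropLast (h_idx - 1) x
  else (stack, h_idx)
termination_by stack.length
decreasing_by
  rename_i h
  have h1 : 0 < stack.length := List.length_pos_of_ne_nil h.1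
  simp only [List.length_dropLast]
  omega

-- outer `while i<len(sequence) and h_idx<len(sequence): …`
def pvOuterA (sequence stack : List Int) (h_idx i : Int) : List Int :=
  if i < (sequence.length : Int) ∧ h_idx < (sequence.length : Int) then
    let x := (PySem.List.pyGet? sequence i).getD 0
    let p := pvInnerA stack h_idx x
    pvOuterA sequence (p.1 ++ [x]) (p.2 + 1) (i + 1)
  else stack
termination_by ((sequence.length : Int) - i).toNat
decreasing_by rename_i h; omega

def examine_buildings_with_subset (sequence : List Int) : List Int :=
  pvOuterA sequence [] (-1) 0

-- ===== PORT B =====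
-- the for-loop of Source B, running over range(len-1, -1, -1), i.e. over sequence.reverse
def pvAltGo (xs : List Int) (best : Option Int) (res : List Int) : List Int :=
  match xs, best with
  | [], _ => res
  | x :: rest, none => pvAltGo rest (some x) (res ++ [x])
  | x :: rest, some b => if b < x then pvAltGo rest (some x) (res ++ [x]) else pvAltGo rest (some b) res

def examine_buildings_with_subset_alt (sequence : List Int) : List Int :=
  (pvAltGo sequence.reverse none []).reverse

-- ===== PRECONDITION & SPEC =====
def Spec_examine_buildings_with_subset (sequence : List Int) (out : List Int) : Prop := out = examine_buildings_with_subset_alt sequence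
instance (sequence : List Int) (out : List Int) : Decidable (Spec_examine_buildings_with_subset sequence out) := by unfold Spec_examine_buildings_with_subset; infer_instance

-- ===== CLAIM (what is proved, stated in full; the proofs are below) =====
def Claim_equal_examine_buildings_with_subset : Prop := ∀ (sequence : List Int), Dom_examine_buildings_with_subset sequence → Spec_examine_buildings_with_subset sequence (examine_buildings_with_subset sequence)

-- ===== LEMMAS AND PROOFS =====

-- `R xs best`: the record (new strict maximum) elements of xs given current best
def pvR : List Int → Option Int → List Int
  | [], _ => []
  | x :: rest, none => x :: pvR rest (some x)
  | x :: rest, some b => if b < x then x :: pvR rest (some x) else pvR rest (some b)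

lemma pvAltGo_eq (xs : List Int) (best : Option Int) (res : List Int) :
    pvAltGo xs best res = res ++ pvR xs best := by
  induction xs generalizing best res with
  | nil => simp [pvAltGo, pvR]
  | cons x rest ih =>
    cases best with
    | none => simp [pvAltGo, pvR, ih]
    | some b =>
      by_cases h : b < x <;> simp [pvAltGo, pvR, h, ih]

-- one step of A's fold, on the reversed stack (head = top)
def pvStep (acc : List Int) (x : Int) : List Int :=
  x :: acc.dropWhile (fun t => decide (t ≤ x))

-- (a::t).reverse ends in a
lemma pvGetLastBang_concat (s : List Int) (a : Int) : (s ++ [a]).getLast! = a := by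
  induction s with
  | nil => rfl
  | cons b t ih =>
    cases h : t ++ [a] with
    | nil => simp at h
    | cons c cs =>
      simp only [List.cons_append, List.getLast!, h] at ih ⊢
      simpa [List.getLast] using ih

lemma pvInnerA_eq (l : List Int) (x : Int) :
    pvInnerA l.reverse ((l.length : Int) - 1) x
      = ((l.dropWhile (fun t => decide (t ≤ x))).reverse,
         ((l.dropWhile (fun t => decide (t ≤ x))).length : Int) - 1) := by
  induction l with
  | nil => rw [pvInnerA]; simp
  | cons a t ih =>
    rw [pvInnerA]
    have hlast : ((a :: t).reverse).getLast! = a := by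
      rw [List.reverse_cons]; exact pvGetLastBang_concat t.reverse a
    by_cases hax : a ≤ x
    · rw [if_pos ⟨by simp, by rw [hlast]; exact hax,
        by simp only [List.length_cons]; push_cast; omega⟩]
      have h1 : ((a :: t).reverse).dropLast = t.reverse := by simp
      have h2 : ((a :: t).length : Int) - 1 - 1 = (t.length : Int) - 1 := by
        simp only [List.length_cons]; push_cast; ring
      rw [h1, h2, ih]
      simp [hax]
    · rw [if_neg (by intro h; exact hax (by rw [hlast] at h; exact h.2.1))]
      simp [hax]

lemma pvOuterA_eq (sequence : List Int) :
    ∀ (n k : Nat) (r : List Int), n = sequence.length - k → k ≤ sequence.length →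
      r.length ≤ k →
      pvOuterA sequence r.reverse ((r.length : Int) - 1) (k : Int)
        = (List.foldl pvStep r (sequence.drop k)).reverse := by
  intro n
  induction n with
  | zero =>
    intro k r hn hk _
    have hkl : k = sequence.length := by omega
    rw [pvOuterA]
    have : ¬ ((k : Int) < (sequence.length : Int) ∧
        ((r.length : Int) - 1) < (sequence.length : Int)) := by
      intro h; omega
    rw [if_neg this]
    subst hkl; simp
  | succ n ih =>
    intro k r hn hk hr
    have hklt : k < sequence.length := by omega
    rw [pvOuterA]
    have hcond : (k : Int) < (sequence.length : Int) ∧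
        ((r.length : Int) - 1) < (sequence.length : Int) := by constructor <;> omega
    rw [if_pos hcond]
    have hget : (PySem.List.pyGet? sequence (k : Int)).getD 0 = sequence[k] := by
      rw [PySem.List.pyGet?_natCast]
      simp [hklt]
    simp only [hget, pvInnerA_eq]
    have hdrop : sequence.drop k = sequence[k] :: sequence.drop (k + 1) :=
      List.drop_eq_getElem_cons hklt
    have hstack : (r.dropWhile (fun t => decide (t ≤ sequence[k]))).reverse ++ [sequence[k]]
        = (pvStep r sequence[k]).reverse := by
      simp [pvStep]
    have hidx : ((r.dropWhile (fun t => decide (t ≤ sequence[k]))).length : Int) - 1 + 1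
        = ((pvStep r sequence[k]).length : Int) - 1 := by
      simp [pvStep]
    have hi : (k : Int) + 1 = ((k + 1 : Nat) : Int) := by push_cast; ring
    rw [hstack, hidx, hi, ih (k + 1) (pvStep r sequence[k]) (by omega) (by omega)
      (by simp only [pvStep, List.length_cons]
          have := List.length_dropWhile_le (fun t => decide (t ≤ sequence[k])) r
          omega)]
    rw [hdrop, List.foldl_cons]

lemma dropWhile_dropWhile {p q : Int → Bool} (h : ∀ t, q t = true → p t = true) :
    ∀ l : List Int, (l.dropWhile q).dropWhile p = l.dropWhile p := by
  intro l
  induction l with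
  | nil => simp
  | cons a t ih =>
    by_cases hq : q a = true
    · have hp := h a hq
      simp [hq, hp, ih]
    · simp [List.dropWhile_cons, hq]

lemma foldl_step_eq_R (ys : List Int) :
    (∀ y : Int, (List.foldl pvStep [] ys).dropWhile (fun t => decide (t ≤ y))
        = pvR ys.reverse (some y))
    ∧ List.foldl pvStep [] ys = pvR ys.reverse none := by
  induction ys using List.reverseRecOn with
  | nil => simp [pvR]
  | append_singleton zs z ih =>
    have hfold : List.foldl pvStep [] (zs ++ [z]) = pvStep (List.foldl pvStep [] zs) z := by
      simp
    constructor
    · intro y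
      rw [hfold]
      simp only [pvStep, List.reverse_append, List.reverse_cons]
      by_cases hzy : z ≤ y
      · have hylt : ¬ y < z := by omega
        simp only [List.dropWhile_cons, decide_eq_true_eq, hzy, if_pos]
        rw [dropWhile_dropWhile (by intro t ht; simp at ht ⊢; omega)]
        simp [pvR, hylt, ih.1 y]
      · have hylt : y < z := by omega
        simp only [List.dropWhile_cons, decide_eq_true_eq, hzy]
        simp [pvR, hylt, ih.1 z]
    · rw [hfold]
      simp only [pvStep, List.reverse_append, List.reverse_cons]
      simp [pvR, ih.1 z]

-- ===== VERDICT (by name: the statement is the Claim_ definition above) =====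
theorem examine_buildings_with_subset_spec : Claim_equal_examine_buildings_with_subset := by
  intro sequence _
  unfold Spec_examine_buildings_with_subset examine_buildings_with_subset
    examine_buildings_with_subset_alt
  have h0 : pvOuterA sequence ([] : List Int).reverse ((([] : List Int).length : Int) - 1)
      ((0 : Nat) : Int) = (List.foldl pvStep [] (sequence.drop 0)).reverse :=
    pvOuterA_eq sequence sequence.length 0 [] (by omega) (by omega) (by simp)
  simp only [List.reverse_nil, List.length_nil, Nat.cast_zero, List.drop_zero] at h0
  norm_num at h0
  rw [h0, pvAltGo_eq, (foldl_step_eq_R sequence).2]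
  simp
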